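-- pv_equiv track=rewrite | github.com/purplesmoke05/dotnix | home-manager/gui/editor/zed/capture_keymap.py | ordered_contexts
-- ===== SOURCE A (Python) =====
-- from typing import Any, Dict, List, Optional, Tuple
--
-- def ordered_contexts(
--     contexts: List[Optional[str]],
--     preferred_context_order: List[Optional[str]],
-- ) -> List[Optional[str]]:
--     preferred = [None, "Workspace", "Editor", "Editor && mode == full", "Terminal", "menu"]
--     ordered: List[Optional[str]] = []
--     for context in preferred_context_order + preferred:
--         if context in contexts and context not in ordered:
--             ordered.append(context)
--     for context in sorted(c for c in contexts if c is not None):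
--         if context not in ordered:
--             ordered.append(context)
--     return ordered
-- ===== SOURCE B (Python) =====
-- from typing import List, Optional
--
-- def ordered_contexts(
--     contexts: List[Optional[str]],
--     preferred_context_order: List[Optional[str]],
-- ) -> List[Optional[str]]:
--     preferred = [None, "Workspace", "Editor", "Editor && mode == full", "Terminal", "menu"]
--     order = list(dict.fromkeys(preferred_context_order + preferred))
--     rank = {c: i for i, c in enumerate(order)}
--     present = list(dict.fromkeys(contexts))
--     ranked = sorted((c for c in present if c in rank), key=lambda c: rank[c])
--     rest = sorted(c for c in present if c not in rank)
--     return ranked + rest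
-- ===== Notes on version B (the rewrite author's own statement) =====
-- stated objective: faster
-- what changed: Replaces A's two accumulation loops with O(n) list-membership scans inside them by a rank dict built once from the deduplicated preference list plus two keyed sorts over the deduplicated contexts (ranked by preference index, the rest alphabetically), concatenated.
import Mathlib
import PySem

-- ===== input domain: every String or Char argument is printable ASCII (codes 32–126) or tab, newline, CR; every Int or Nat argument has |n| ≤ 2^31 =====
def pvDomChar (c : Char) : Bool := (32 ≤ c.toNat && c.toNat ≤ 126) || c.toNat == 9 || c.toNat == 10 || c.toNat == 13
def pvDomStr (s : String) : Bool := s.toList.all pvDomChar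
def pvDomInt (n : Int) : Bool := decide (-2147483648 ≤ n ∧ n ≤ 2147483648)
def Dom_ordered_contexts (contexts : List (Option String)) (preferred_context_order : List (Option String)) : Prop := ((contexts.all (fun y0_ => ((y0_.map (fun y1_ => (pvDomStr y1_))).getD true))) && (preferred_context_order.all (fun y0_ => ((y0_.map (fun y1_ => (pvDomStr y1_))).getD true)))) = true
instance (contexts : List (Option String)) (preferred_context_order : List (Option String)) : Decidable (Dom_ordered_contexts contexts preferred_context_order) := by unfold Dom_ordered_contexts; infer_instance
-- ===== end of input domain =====

-- B replaces A's two membership-scanning accumulation loops by a rank dict over the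
-- deduplicated preference list plus two keyed sorts of the deduplicated contexts (faster: no per-element list-membership scans).
-- the `preferred` literal both Pythons start from
def pvPreferred : List (Option String) :=
  [none, some "Workspace", some "Editor", some "Editor && mode == full", some "Terminal", some "menu"]

-- ===== PORT A =====
def ordered_contexts (contexts : List (Option String)) (preferred_context_order : List (Option String)) : List (Option String) :=
  -- first loop: for context in preferred_context_order + preferred: append if present and new
  let ordered1 := (preferred_context_order ++ pvPreferred).foldl
    (fun acc context => if context ∈ contexts ∧ context ∉ acc then acc ++ [context] else acc) []
  -- second loop: for context in sorted(c for c in contexts if c is not None): append if new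
  (PySem.List.sorted (contexts.filterMap (fun c => c)) (fun c => c) false).foldl
    (fun acc context => if (some context) ∉ acc then acc ++ [some context] else acc) ordered1

-- ===== PORT B =====
def ordered_contexts_alt (contexts : List (Option String)) (preferred_context_order : List (Option String)) : List (Option String) :=
  let order := PySem.List.dedup (preferred_context_order ++ pvPreferred)
  -- rank = {c: i for i, c in enumerate(order)}
  let rank : PySem.Dict (Option String) Int :=
    (PySem.List.enumerate order 0).foldl (fun d p => d.insert p.2 p.1) PySem.Dict.empty
  let present := PySem.List.dedup contexts
  -- key=lambda c: rank[c]; getD's default is never used: every filtered c is a key of rank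
  let ranked := PySem.List.sorted (present.filter (fun c => rank.contains c)) (fun c => rank.getD c 0) false
  -- sorted over plain strings: every unranked context is `some` (None is always ranked), so getD "" is exact
  let rest := PySem.List.sorted (present.filter (fun c => !(rank.contains c))) (fun c => c.getD "") false
  ranked ++ rest

-- ===== PRECONDITION & SPEC =====
def Spec_ordered_contexts (contexts : List (Option String)) (preferred_context_order : List (Option String)) (out : List (Option String)) : Prop := out = ordered_contexts_alt contexts preferred_context_order
instance (contexts : List (Option String)) (preferred_context_order : List (Option String)) (out : List (Option String)) : Decidable (Spec_ordered_contexts contexts preferred_context_order out) := by unfold Spec_ordered_contexts; infer_instance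

-- ===== CLAIM (what is proved, stated in full; the proofs are below) =====
def Claim_equal_ordered_contexts : Prop := ∀ (contexts : List (Option String)) (preferred_context_order : List (Option String)), Dom_ordered_contexts contexts preferred_context_order → Spec_ordered_contexts contexts preferred_context_order (ordered_contexts contexts preferred_context_order)

-- ===== LEMMAS AND PROOFS =====

-- set(xs) is a sublist of xs
theorem pv_ofList_sublist {α : Type} [BEq α] [LawfulBEq α] (xs : List α) :
    (PySem.Set.ofList xs).Sublist xs := by
  induction xs using List.reverseRecOn with
  | nil => simp [PySem.Set.ofList_nil]
  | append_singleton xs x ih =>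
    rw [PySem.Set.ofList_append_singleton, PySem.Set.add_eq_ite]
    split_ifs
    · exact ih.trans (List.sublist_append_left _ _)
    · exact ih.append_right _

-- dedup commutes with filter
theorem pv_ofList_filter {α : Type} [BEq α] [LawfulBEq α] (xs : List α) (q : α → Bool) :
    PySem.Set.ofList (xs.filter q) = (PySem.Set.ofList xs).filter q := by
  induction xs using List.reverseRecOn with
  | nil => simp [PySem.Set.ofList_nil]
  | append_singleton xs x ih =>
    rw [List.filter_append, PySem.Set.ofList_append_singleton, PySem.Set.add_eq_ite]
    by_cases hq : q x
    · rw [List.filter_cons_of_pos hq, List.filter_nil, PySem.Set.ofList_append_singleton,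
        PySem.Set.add_eq_ite, ih]
      by_cases hx : x ∈ xs
      · rw [if_pos (by simp [PySem.Set.mem_ofList, List.mem_filter]; exact ⟨hx, hq⟩),
          if_pos (by simp [PySem.Set.mem_ofList]; exact hx)]
      · rw [if_neg (by simp [PySem.Set.mem_ofList, List.mem_filter]; exact fun h => absurd h hx),
          if_neg (by simp [PySem.Set.mem_ofList]; exact hx), List.filter_append,
          List.filter_cons_of_pos hq, List.filter_nil]
    · rw [List.filter_cons_of_neg (by simpa using hq), List.filter_nil, List.append_nil, ih]
      by_cases hx : x ∈ xs
      · rw [if_pos (by simp [PySem.Set.mem_ofList]; exact hx)]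
      · rw [if_neg (by simp [PySem.Set.mem_ofList]; exact hx), List.filter_append,
          List.filter_cons_of_neg (by simpa using hq), List.filter_nil, List.append_nil]

theorem pv_mem_enumerate {α : Type} (xs : List α) (s : Int) (i : Nat) (h : i < xs.length) :
    ((s + i : Int), xs[i]) ∈ PySem.List.enumerate xs s := by
  induction xs generalizing s i with
  | nil => simp at h
  | cons x xs ih =>
    rw [PySem.List.enumerate_cons]
    cases i with
    | zero => simp
    | succ j =>
      right
      have := ih (s + 1) j (by simpa using h)
      simpa [add_comm, add_left_comm, add_assoc] using this

-- the rank dict of B: keys are the deduplicated preference list, value = position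
theorem pv_rank_keys (P : List (Option String)) :
    ((PySem.List.enumerate (PySem.Set.ofList P) 0).foldl
      (fun d p => d.insert p.2 p.1) (PySem.Dict.empty : PySem.Dict (Option String) Int)).keys
      = PySem.Set.ofList P := by
  rw [PySem.Dict.keys_foldl_insert_key]
  simp [PySem.List.map_snd_enumerate, PySem.Set.update_nil_left, PySem.Set.ofList_ofList,
    PySem.Dict.keys_empty]

theorem pv_rank_getD (P : List (Option String)) (i : Nat) (h : i < (PySem.Set.ofList P).length) :
    ((PySem.List.enumerate (PySem.Set.ofList P) 0).foldl
      (fun d p => d.insert p.2 p.1) (PySem.Dict.empty : PySem.Dict (Option String) Int)).getD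
      (PySem.Set.ofList P)[i] 0 = (i : Int) := by
  have hitems := PySem.Dict.items_foldl_insert_fresh
    (l := PySem.List.enumerate (PySem.Set.ofList P) 0) (k := fun p => p.2) (v := fun p => p.1)
    (d := PySem.Dict.empty)
    (by intro a _; simp [PySem.Dict.contains_empty])
    (by rw [PySem.List.map_snd_enumerate]; exact PySem.Set.nodup_ofList P)
  apply PySem.Dict.getD_of_mem_items
  · rw [hitems]
    simp only [PySem.Dict.empty, List.nil_append]
    have := pv_mem_enumerate (PySem.Set.ofList P) 0 i h
    refine List.mem_map.mpr ⟨((0 + i : Int), (PySem.Set.ofList P)[i]), this, by simp⟩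
  · rw [pv_rank_keys]; exact PySem.Set.nodup_ofList P

theorem pv_ord_pairwise_rank (P : List (Option String)) :
    (PySem.Set.ofList P).Pairwise (fun a b =>
      ((PySem.List.enumerate (PySem.Set.ofList P) 0).foldl
        (fun d p => d.insert p.2 p.1) (PySem.Dict.empty : PySem.Dict (Option String) Int)).getD a 0
      < ((PySem.List.enumerate (PySem.Set.ofList P) 0).foldl
        (fun d p => d.insert p.2 p.1) (PySem.Dict.empty : PySem.Dict (Option String) Int)).getD b 0) := by
  rw [List.pairwise_iff_getElem]
  intro i j hi hj hij
  rw [pv_rank_getD P i hi, pv_rank_getD P j hj]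
  exact_mod_cast hij

-- A's first loop is dedup-then-filter of the preference list
theorem pv_loopA1 (contexts P : List (Option String)) :
    P.foldl (fun acc c => if c ∈ contexts ∧ c ∉ acc then acc ++ [c] else acc) []
      = (PySem.Set.ofList P).filter (fun c => decide (c ∈ contexts)) := by
  rw [← pv_ofList_filter P (fun c => decide (c ∈ contexts))]
  induction P using List.reverseRecOn with
  | nil => simp [PySem.Set.ofList_nil]
  | append_singleton P x ih =>
    rw [List.foldl_append, List.foldl_cons, List.foldl_nil, ih, List.filter_append]
    by_cases hc : x ∈ contexts
    · rw [List.filter_cons_of_pos (by simpa using hc), List.filter_nil,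
        PySem.Set.ofList_append_singleton, PySem.Set.add_eq_ite]
      by_cases hm : x ∈ PySem.Set.ofList (P.filter (fun c => decide (c ∈ contexts)))
      · rw [if_pos hm, if_neg (by simp [hm, hc])]
      · rw [if_neg hm, if_pos ⟨hc, hm⟩]
    · rw [if_neg (by simp [hc]), List.filter_cons_of_neg (by simpa using hc), List.filter_nil,
        List.append_nil]

-- A's second loop is Set.update by the sorted somes
theorem pv_loopA2 (L : List (Option String)) (S : List String) :
    S.foldl (fun acc s => if (some s) ∉ acc then acc ++ [some s] else acc) L
      = PySem.Set.update L (S.map some) := by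
  have hupd : PySem.Set.update L (S.map some)
      = (S.map some).foldl (fun acc m => PySem.Set.add acc m) L := rfl
  rw [hupd, List.foldl_map]
  congr 1
  funext acc s
  rw [PySem.Set.add_eq_ite, ite_not]

-- abbreviations for the proof
def pvP (pco : List (Option String)) : List (Option String) := pco ++ pvPreferred

def pvRank (pco : List (Option String)) : PySem.Dict (Option String) Int :=
  (PySem.List.enumerate (PySem.Set.ofList (pvP pco)) 0).foldl
    (fun d p => d.insert p.2 p.1) PySem.Dict.empty

def pvL1 (cs pco : List (Option String)) : List (Option String) :=
  (PySem.Set.ofList (pvP pco)).filter (fun c => decide (c ∈ cs))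

def pvS (cs : List (Option String)) : List String :=
  PySem.List.sorted (cs.filterMap (fun c => c)) (fun c => c) false

def pvT (cs pco : List (Option String)) : List (Option String) :=
  ((PySem.Set.ofList ((pvS cs).map some)) : List (Option String)).filter
    (fun y => !(PySem.Set.contains (pvL1 cs pco) y))

theorem pv_mem_L1 (cs pco : List (Option String)) (a : Option String) :
    a ∈ pvL1 cs pco ↔ a ∈ pvP pco ∧ a ∈ cs := by
  simp [pvL1, List.mem_filter, PySem.Set.mem_ofList]

theorem pv_contains_rank (pco : List (Option String)) (a : Option String) :
    (pvRank pco).contains a = true ↔ a ∈ pvP pco := by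
  rw [PySem.Dict.contains_iff_mem_keys, pvRank, pv_rank_keys, PySem.Set.mem_ofList]

theorem pv_E1 (cs pco : List (Option String)) :
    PySem.List.sorted ((PySem.Set.ofList cs : List (Option String)).filter
        (fun c => (pvRank pco).contains c))
      (fun c => (pvRank pco).getD c 0) false = pvL1 cs pco := by
  apply PySem.List.sorted_eq_of_perm_of_pairwise_lt
  · rw [List.perm_ext_iff_of_nodup
      (show (pvL1 cs pco).Nodup from List.Nodup.filter _ (PySem.Set.nodup_ofList (pvP pco)))
      (List.Nodup.filter _ (PySem.Set.nodup_ofList cs))]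
    intro a
    rw [pv_mem_L1, List.mem_filter, PySem.Set.mem_ofList, pv_contains_rank]
    tauto
  · exact List.Pairwise.filter _ (pv_ord_pairwise_rank (pvP pco))

theorem pv_none_mem_P (pco : List (Option String)) : (none : Option String) ∈ pvP pco := by
  simp [pvP, pvPreferred]

theorem pv_mem_T (cs pco : List (Option String)) (a : Option String) :
    a ∈ pvT cs pco ↔ (∃ s, a = some s ∧ a ∈ cs) ∧ ¬(a ∈ pvP pco ∧ a ∈ cs) := by
  simp only [pvT, List.mem_filter, PySem.Set.mem_ofList, List.mem_map, Bool.not_eq_eq_eq_not,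
    Bool.not_true]
  constructor
  · rintro ⟨⟨s, hs, rfl⟩, hnc⟩
    rw [pvS, PySem.List.mem_sorted, List.mem_filterMap] at hs
    obtain ⟨c, hc, hcs⟩ := hs
    refine ⟨⟨s, rfl, by rwa [show c = some s from hcs] at hc⟩, ?_⟩
    intro hmem
    have htrue := (PySem.Set.contains_iff (pvL1 cs pco) _).mpr ((pv_mem_L1 cs pco _).mpr hmem)
    rw [htrue] at hnc; exact absurd hnc (by simp)
  · rintro ⟨⟨s, rfl, hIn⟩, hnp⟩
    refine ⟨⟨s, ?_, rfl⟩, ?_⟩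
    · rw [pvS, PySem.List.mem_sorted, List.mem_filterMap]; exact ⟨some s, hIn, rfl⟩
    · have : some s ∉ pvL1 cs pco := fun h => hnp ((pv_mem_L1 cs pco _).mp h)
      simp [this]

theorem pv_T_pairwise (cs pco : List (Option String)) :
    (pvT cs pco).Pairwise (fun a b => a.getD "" < b.getD "") := by
  have hS : (pvS cs).Pairwise (fun a b => a ≤ b) :=
    PySem.List.sorted_pairwise (cs.filterMap (fun c => c)) (fun c => c)
  have hM : ((pvS cs).map some).Pairwise
      (fun a b : Option String => a.getD "" ≤ b.getD "") := by
    rw [List.pairwise_map]; simpa using hS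
  have hOf := List.Pairwise.sublist (pv_ofList_sublist ((pvS cs).map some)) hM
  have hle : (pvT cs pco).Pairwise (fun a b : Option String => a.getD "" ≤ b.getD "") :=
    List.Pairwise.filter _ hOf
  have hne : (pvT cs pco).Pairwise (fun a b : Option String => a ≠ b) :=
    List.Nodup.filter _ (PySem.Set.nodup_ofList _)
  refine List.Pairwise.imp_of_mem ?_ (hle.and hne)
  intro a b ha hb hab
  obtain ⟨⟨s, rfl, _⟩, _⟩ := (pv_mem_T cs pco a).mp ha
  obtain ⟨⟨t, rfl, _⟩, _⟩ := (pv_mem_T cs pco b).mp hb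
  simp only [Option.getD_some] at hab ⊢
  exact lt_of_le_of_ne hab.1 (fun h => hab.2 (by rw [h]))

theorem pv_E2 (cs pco : List (Option String)) :
    PySem.List.sorted ((PySem.Set.ofList cs : List (Option String)).filter
        (fun c => !((pvRank pco).contains c)))
      (fun c => c.getD "") false = pvT cs pco := by
  apply PySem.List.sorted_eq_of_perm_of_pairwise_lt
  · rw [List.perm_ext_iff_of_nodup
      (show (pvT cs pco).Nodup from List.Nodup.filter _ (PySem.Set.nodup_ofList _))
      (List.Nodup.filter _ (PySem.Set.nodup_ofList cs))]
    intro a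
    rw [pv_mem_T, List.mem_filter, PySem.Set.mem_ofList]
    constructor
    · rintro ⟨⟨s, rfl, hIn⟩, hnp⟩
      refine ⟨hIn, ?_⟩
      simp only [Bool.not_eq_eq_eq_not, Bool.not_true, ← Bool.not_eq_true, pv_contains_rank]
      exact fun hp => hnp ⟨hp, hIn⟩
    · rintro ⟨hIn, hnc⟩
      have hnp : a ∉ pvP pco := by
        intro hp
        rw [show ((!(pvRank pco).contains a) = true) ↔ ¬((pvRank pco).contains a = true) by simp,
          pv_contains_rank] at hnc
        exact hnc hp
      refine ⟨?_, fun h => hnp h.1⟩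
      cases a with
      | none => exact absurd (pv_none_mem_P pco) hnp
      | some s => exact ⟨s, rfl, hIn⟩
  · exact pv_T_pairwise cs pco

theorem pv_A_eq (cs pco : List (Option String)) :
    ordered_contexts cs pco = pvL1 cs pco ++ pvT cs pco := by
  simp only [ordered_contexts]
  rw [pv_loopA1 cs (pco ++ pvPreferred), pv_loopA2, PySem.Set.update_eq_append_filter]
  rfl

theorem pv_B_eq (cs pco : List (Option String)) :
    ordered_contexts_alt cs pco = pvL1 cs pco ++ pvT cs pco := by
  simp only [ordered_contexts_alt, PySem.List.dedup_eq_ofList]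
  rw [show pco ++ pvPreferred = pvP pco from rfl]
  have hR : (PySem.List.enumerate (PySem.Set.ofList (pvP pco)) 0).foldl
      (fun d p => d.insert p.2 p.1) PySem.Dict.empty = pvRank pco := rfl
  rw [hR, pv_E1 cs pco, pv_E2 cs pco]

-- ===== VERDICT (by name: the statement is the Claim_ definition above) =====
theorem ordered_contexts_spec : Claim_equal_ordered_contexts := by
  intro cs pco _
  unfold Spec_ordered_contexts
  rw [pv_A_eq, pv_B_eq]
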